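-- pv_equiv track=rewrite | github.com/karkirowle/pathbench | extract_torgo_paths.py | get_intersection_texts
-- ===== SOURCE A (Python) =====
-- from collections import defaultdict
--
-- def get_intersection_texts(entries, group_filter="pathological", type_filter="word"):
--     """
--     Returns the set of NORMALIZED TEXTS spoken by ALL speakers in the target group.
--     """
--     filtered = [e for e in entries if e["group"] == group_filter and e["dtype"] == type_filter]
--
--     text_to_spk = defaultdict(set)
--     all_spk = set()
--
--     for e in filtered:
--         text_to_spk[e["norm_text"]].add(e["speaker"])
--         all_spk.add(e["speaker"])
--
--     intersection = set()
--     for text, speakers in text_to_spk.items():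
--         if speakers == all_spk:
--             intersection.add(text)
--
--     return intersection, all_spk
-- ===== SOURCE B (Python) =====
-- def get_intersection_texts(entries, group_filter="pathological", type_filter="word"):
--     """
--     Returns the set of NORMALIZED TEXTS spoken by ALL speakers in the target group.
--     Single pass: counts, per text, the number of DISTINCT speakers who said it
--     (deduplicating (text, speaker) pairs with a seen-set); a text is in the
--     intersection iff its distinct-speaker count equals the total speaker count.
--     """
--     seen_pairs = set()
--     speaker_count = {}  # text -> number of distinct speakers who said it
--     all_spk = set()
--     for e in entries:
--         if e["group"] == group_filter and e["dtype"] == type_filter: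
--             t, s = e["norm_text"], e["speaker"]
--             if (t, s) not in seen_pairs:
--                 seen_pairs.add((t, s))
--                 speaker_count[t] = speaker_count.get(t, 0) + 1
--             all_spk.add(s)
--     n = len(all_spk)
--     return {t for t, c in speaker_count.items() if c == n}, all_spk
-- ===== Notes on version B (the rewrite author's own statement) =====
-- stated objective: alternative
-- what changed: Instead of grouping a per-text set of speakers and comparing each against the full speaker set, B makes a single pass that deduplicates (text, speaker) pairs with a seen-set and keeps an integer distinct-speaker count per text, returning the texts whose count equals the total number of speakers.
import Mathlib
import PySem

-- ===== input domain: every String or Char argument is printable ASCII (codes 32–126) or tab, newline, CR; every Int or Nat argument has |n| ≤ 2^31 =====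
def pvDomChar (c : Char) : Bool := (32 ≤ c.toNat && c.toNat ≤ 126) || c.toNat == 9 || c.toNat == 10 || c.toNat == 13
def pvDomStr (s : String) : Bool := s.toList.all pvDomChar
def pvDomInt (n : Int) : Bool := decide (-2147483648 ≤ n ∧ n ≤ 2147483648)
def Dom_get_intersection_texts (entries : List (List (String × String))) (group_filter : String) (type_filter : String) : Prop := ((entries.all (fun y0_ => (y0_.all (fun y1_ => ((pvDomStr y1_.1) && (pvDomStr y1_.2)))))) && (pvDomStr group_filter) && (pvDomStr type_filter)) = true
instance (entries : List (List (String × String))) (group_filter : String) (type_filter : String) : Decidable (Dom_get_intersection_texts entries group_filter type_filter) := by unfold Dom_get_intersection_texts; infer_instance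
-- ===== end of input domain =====

-- B replaces A's per-text speaker-sets (each compared against the full speaker set) by a single
-- pass that counts DISTINCT speakers per text via a seen-(text,speaker)-pair set, keeping a text
-- iff its count equals the total number of speakers (objective: alternative algorithm, same cost).
-- Entries are Python dicts, modelled as association lists with first-match lookup.

-- shared helper: Python's e[k] on an entry; total form with default "" — Pre_ excludes the
-- inputs where Python would raise KeyError, so the default is never what the result rests on.
def pvGet (e : List (String × String)) (k : String) : String :=
  ((PySem.Dict.mk e).get? k).getD ""

-- ===== PORT A =====
def get_intersection_texts (entries : List (List (String × String))) (group_filter : String) (type_filter : String) : List String × List String :=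
  let filtered := entries.filter (fun e => pvGet e "group" == group_filter && pvGet e "dtype" == type_filter)
  let st := filtered.foldl
    (fun (st : PySem.Dict String (PySem.Set String) × PySem.Set String) e =>
      (st.1.modify (pvGet e "norm_text") PySem.Set.empty (fun v => PySem.Set.add v (pvGet e "speaker")),
       PySem.Set.add st.2 (pvGet e "speaker")))
    (PySem.Dict.empty, PySem.Set.empty)
  let intersection := st.1.items.foldl
    (fun acc p => if PySem.Set.equal p.2 st.2 then PySem.Set.add acc p.1 else acc)
    PySem.Set.empty
  (intersection, st.2)

-- ===== PORT B =====
def get_intersection_texts_alt (entries : List (List (String × String))) (group_filter : String) (type_filter : String) : List String × List String :=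
  let st := entries.foldl
    (fun (st : (PySem.Set (String × String) × PySem.Dict String Int) × PySem.Set String) e =>
      if pvGet e "group" == group_filter && pvGet e "dtype" == type_filter then
        ((if st.1.1.contains (pvGet e "norm_text", pvGet e "speaker") then st.1
          else (PySem.Set.add st.1.1 (pvGet e "norm_text", pvGet e "speaker"),
                st.1.2.insert (pvGet e "norm_text") (st.1.2.getD (pvGet e "norm_text") 0 + 1))),
         PySem.Set.add st.2 (pvGet e "speaker"))
      else st)
    ((PySem.Set.empty, PySem.Dict.empty), PySem.Set.empty)
  let n : Int := PySem.Set.len st.2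
  (PySem.Set.ofList ((st.1.2.items.filter (fun p => p.2 == n)).map (fun p => p.1)), st.2)

-- ===== PRECONDITION & SPEC =====
-- Pre_ excludes exactly the inputs on which Python A raises KeyError: an entry missing "group",
-- one with matching group missing "dtype", or a fully matching entry missing "norm_text"/"speaker".
def Pre_get_intersection_texts (entries : List (List (String × String))) (group_filter : String) (type_filter : String) : Prop :=
  ∀ e ∈ entries, (PySem.Dict.mk e).contains "group" = true ∧
    (pvGet e "group" = group_filter → (PySem.Dict.mk e).contains "dtype" = true) ∧
    (pvGet e "group" = group_filter ∧ pvGet e "dtype" = type_filter →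
      (PySem.Dict.mk e).contains "norm_text" = true ∧ (PySem.Dict.mk e).contains "speaker" = true)
instance (entries : List (List (String × String))) (group_filter : String) (type_filter : String) : Decidable (Pre_get_intersection_texts entries group_filter type_filter) := by unfold Pre_get_intersection_texts; infer_instance

def pvWitness_get_intersection_texts : (List (List (String × String))) × String × String :=
  ([[("group", "pathological"), ("dtype", "word"), ("norm_text", "hello"), ("speaker", "s1")],
    [("group", "control"), ("dtype", "word")]], "pathological", "word")

def Spec_get_intersection_texts (entries : List (List (String × String))) (group_filter : String) (type_filter : String) (out : List String × List String) : Prop := out = get_intersection_texts_alt entries group_filter type_filter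
instance (entries : List (List (String × String))) (group_filter : String) (type_filter : String) (out : List String × List String) : Decidable (Spec_get_intersection_texts entries group_filter type_filter out) := by unfold Spec_get_intersection_texts; infer_instance

-- ===== CLAIM (what is proved, stated in full; the proofs are below) =====
def Claim_equal_get_intersection_texts : Prop := ∀ (entries : List (List (String × String))) (group_filter : String) (type_filter : String), Dom_get_intersection_texts entries group_filter type_filter → Pre_get_intersection_texts entries group_filter type_filter → Spec_get_intersection_texts entries group_filter type_filter (get_intersection_texts entries group_filter type_filter)

-- ===== LEMMAS AND PROOFS =====

-- the speaker-set accumulator loop is set(map spk l)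
theorem pvAll {α : Type} (l : List α) (spk : α → String) :
    l.foldl (fun s e => PySem.Set.add s (spk e)) PySem.Set.empty = PySem.Set.ofList (l.map spk) := by
  rw [← PySem.Set.update_map_eq_foldl_add]
  exact PySem.Set.update_nil_left _

-- A's grouping dict: the value at t is the set of speakers of the entries with text t
theorem pvDictA {α : Type} (l : List α) (key spk : α → String) (t : String) :
    (l.foldl (fun d e => d.modify (key e) PySem.Set.empty (fun v => PySem.Set.add v (spk e)))
        PySem.Dict.empty).getD t PySem.Set.empty
      = PySem.Set.ofList ((l.filter (fun e => key e == t)).map spk) := by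
  induction l using List.reverseRecOn with
  | nil => simp [PySem.Dict.getD_empty, PySem.Set.ofList_nil]
  | append_singleton l e ih =>
    simp only [List.foldl_append, List.foldl_cons, List.foldl_nil, List.filter_append]
    rw [PySem.Dict.getD_modify]
    by_cases h : t = key e
    · subst h
      rw [if_pos rfl, ih]
      have h1 : (List.filter (fun e' => key e' == key e) [e]) = [e] := by simp
      rw [h1, List.map_append, List.map_cons, List.map_nil, PySem.Set.ofList_append_singleton]
    · rw [if_neg h, ih]
      have h1 : (List.filter (fun e' => key e' == t) [e]) = [] := by
        simp; exact fun hh => h hh.symm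
      rw [h1, List.append_nil]

-- A's grouping dict keys are the texts in first-occurrence order
theorem pvKeysA {α : Type} (l : List α) (key spk : α → String) :
    (l.foldl (fun d e => d.modify (key e) PySem.Set.empty (fun v => PySem.Set.add v (spk e)))
        PySem.Dict.empty).keys = PySem.Set.ofList (l.map key) := by
  rw [PySem.Dict.keys_foldl_modify_key l key PySem.Set.empty
    (fun _ e => fun v => PySem.Set.add v (spk e)) PySem.Dict.empty]
  rw [PySem.Dict.keys_empty, PySem.Set.update_nil_left]

-- B's state: seen = set of (text,speaker) pairs; count keys = texts in order;
-- count of t = number of distinct pairs with first component t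
theorem pvStateB {α : Type} (l : List α) (key spk : α → String) :
    (l.foldl (fun sc e => if sc.1.contains (key e, spk e) then sc
        else (PySem.Set.add sc.1 (key e, spk e), sc.2.insert (key e) (sc.2.getD (key e) 0 + 1)))
        ((PySem.Set.empty : PySem.Set (String × String)), (PySem.Dict.empty : PySem.Dict String Int))).1
        = PySem.Set.ofList (l.map (fun e => (key e, spk e)))
    ∧ (l.foldl (fun sc e => if sc.1.contains (key e, spk e) then sc
        else (PySem.Set.add sc.1 (key e, spk e), sc.2.insert (key e) (sc.2.getD (key e) 0 + 1)))
        ((PySem.Set.empty : PySem.Set (String × String)), (PySem.Dict.empty : PySem.Dict String Int))).2.keys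
        = PySem.Set.ofList (l.map key)
    ∧ ∀ t, (l.foldl (fun sc e => if sc.1.contains (key e, spk e) then sc
        else (PySem.Set.add sc.1 (key e, spk e), sc.2.insert (key e) (sc.2.getD (key e) 0 + 1)))
        ((PySem.Set.empty : PySem.Set (String × String)), (PySem.Dict.empty : PySem.Dict String Int))).2.getD t 0
        = (((PySem.Set.ofList (l.map (fun e => (key e, spk e)))).filter
            (fun p => p.1 == t)).length : Int) := by
  induction l using List.reverseRecOn with
  | nil =>
    refine ⟨rfl, rfl, fun t => ?_⟩
    simp [PySem.Dict.getD_empty, PySem.Set.ofList_nil]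
  | append_singleton l e ih =>
    obtain ⟨ih1, ih2, ih3⟩ := ih
    simp only [List.foldl_append, List.foldl_cons, List.foldl_nil, List.map_append,
      List.map_cons, List.map_nil, PySem.Set.ofList_append_singleton]
    by_cases hc : (l.foldl (fun sc e => if sc.1.contains (key e, spk e) then sc
        else (PySem.Set.add sc.1 (key e, spk e), sc.2.insert (key e) (sc.2.getD (key e) 0 + 1)))
        ((PySem.Set.empty : PySem.Set (String × String)), (PySem.Dict.empty : PySem.Dict String Int))).1.contains
        (key e, spk e)
    · have hmem : (key e, spk e) ∈ PySem.Set.ofList (l.map (fun e => (key e, spk e))) := by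
        rw [← ih1]; exact (PySem.Set.contains_iff _ _).1 hc
      rw [if_pos hc, PySem.Set.add_of_mem hmem]
      have hkey : key e ∈ PySem.Set.ofList (l.map key) := by
        rw [PySem.Set.mem_ofList]
        rw [PySem.Set.mem_ofList, List.mem_map] at hmem
        obtain ⟨x, hx, hxe⟩ := hmem
        exact List.mem_map.2 ⟨x, hx, congrArg Prod.fst hxe⟩
      rw [PySem.Set.add_of_mem hkey]
      exact ⟨ih1, ih2, ih3⟩
    · rw [if_neg hc]
      have hnmem : (key e, spk e) ∉ PySem.Set.ofList (l.map (fun e => (key e, spk e))) := by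
        rw [← ih1]; intro hm; exact hc ((PySem.Set.contains_iff _ _).2 hm)
      refine ⟨by rw [ih1], ?_, ?_⟩
      · by_cases hk : key e ∈ PySem.Set.ofList (l.map key)
        · have hcont : (l.foldl (fun sc e => if sc.1.contains (key e, spk e) then sc
              else (PySem.Set.add sc.1 (key e, spk e), sc.2.insert (key e) (sc.2.getD (key e) 0 + 1)))
              ((PySem.Set.empty : PySem.Set (String × String)), (PySem.Dict.empty : PySem.Dict String Int))).2.contains
              (key e) = true := by
            rw [PySem.Dict.contains_iff_mem_keys, ih2]; exact hk
          rw [PySem.Dict.keys_insert_of_contains _ _ hcont, ih2, PySem.Set.add_of_mem hk]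
        · have hcont : (l.foldl (fun sc e => if sc.1.contains (key e, spk e) then sc
              else (PySem.Set.add sc.1 (key e, spk e), sc.2.insert (key e) (sc.2.getD (key e) 0 + 1)))
              ((PySem.Set.empty : PySem.Set (String × String)), (PySem.Dict.empty : PySem.Dict String Int))).2.contains
              (key e) = false := by
            cases hx : (l.foldl (fun sc e => if sc.1.contains (key e, spk e) then sc
                else (PySem.Set.add sc.1 (key e, spk e), sc.2.insert (key e) (sc.2.getD (key e) 0 + 1)))
                ((PySem.Set.empty : PySem.Set (String × String)), (PySem.Dict.empty : PySem.Dict String Int))).2.contains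
                (key e) with
            | false => rfl
            | true =>
              exact absurd (by rw [← ih2, ← PySem.Dict.contains_iff_mem_keys]; exact hx) hk
          rw [PySem.Dict.keys_insert_of_not_contains _ _ hcont, ih2,
            PySem.Set.add_of_not_mem hk]
      · intro t
        rw [PySem.Dict.getD_insert, PySem.Set.add_of_not_mem hnmem, List.filter_append]
        by_cases ht : t = key e
        · subst ht
          rw [if_pos rfl, ih3]
          have h1 : (List.filter (fun p : String × String => p.1 == key e) [(key e, spk e)])
              = [(key e, spk e)] := by simp
          rw [h1]
          simp only [List.length_append, List.length_cons, List.length_nil]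
          push_cast; ring
        · rw [if_neg ht]
          have h1 : (List.filter (fun p : String × String => p.1 == t) [(key e, spk e)])
              = [] := by simp; exact fun hh => ht hh.symm
          rw [h1, List.append_nil, ih3]

-- the distinct pairs with first component t are t paired with the distinct speakers of text t
theorem pvPairs (ps : List (String × String)) (t : String) :
    (PySem.Set.ofList ps).filter (fun p => p.1 == t)
      = ((PySem.Set.ofList ((ps.filter (fun p => p.1 == t)).map (fun p => p.2))).map
          (fun s => (t, s))) := by
  induction ps using List.reverseRecOn with
  | nil => simp [PySem.Set.ofList_nil]
  | append_singleton ps p ih =>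
    rw [PySem.Set.ofList_append_singleton, List.filter_append]
    by_cases hm : p ∈ PySem.Set.ofList ps
    · rw [PySem.Set.add_of_mem hm, ih]
      by_cases ht : p.1 = t
      · have h1 : (List.filter (fun p : String × String => p.1 == t) [p]) = [p] := by simp [ht]
        rw [h1, List.map_append, List.map_cons, List.map_nil, PySem.Set.ofList_append_singleton]
        have hp2 : p.2 ∈ PySem.Set.ofList ((ps.filter (fun p => p.1 == t)).map (fun p => p.2)) := by
          rw [PySem.Set.mem_ofList, List.mem_map]
          exact ⟨p, List.mem_filter.2 ⟨(PySem.Set.mem_ofList _ _).1 hm, by simp [ht]⟩, rfl⟩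
        rw [PySem.Set.add_of_mem hp2]
      · have h1 : (List.filter (fun p : String × String => p.1 == t) [p]) = [] := by
          simp; exact ht
        rw [h1, List.append_nil]
    · rw [PySem.Set.add_of_not_mem hm, List.filter_append, ih]
      by_cases ht : p.1 = t
      · have h1 : (List.filter (fun p : String × String => p.1 == t) [p]) = [p] := by simp [ht]
        rw [h1, List.map_append, List.map_cons, List.map_nil, PySem.Set.ofList_append_singleton]
        have hp2 : p.2 ∉ PySem.Set.ofList ((ps.filter (fun p => p.1 == t)).map (fun p => p.2)) := by
          rw [PySem.Set.mem_ofList, List.mem_map]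
          rintro ⟨q, hq, hq2⟩
          obtain ⟨hqm, hqt⟩ := List.mem_filter.1 hq
          apply hm
          rw [PySem.Set.mem_ofList]
          have hq1 : q.1 = t := by simpa using hqt
          have hqp : q = p := Prod.ext (hq1.trans ht.symm) hq2
          rw [← hqp]; exact hqm
        rw [PySem.Set.add_of_not_mem hp2, List.map_append, List.map_cons, List.map_nil]
        have h2 : (t, p.2) = p := by rw [← ht]
        rw [h2]
      · have h1 : (List.filter (fun p : String × String => p.1 == t) [p]) = [] := by
          simp; exact ht
        rw [h1, List.append_nil, List.append_nil]

-- pairs of l filtered on the text: the seconds are the speakers of the entries with that text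
theorem pvPairsMap {α : Type} (l : List α) (key spk : α → String) (t : String) :
    ((l.map (fun e => (key e, spk e))).filter (fun p => p.1 == t)).map (fun p => p.2)
      = (l.filter (fun e => key e == t)).map spk := by
  rw [List.filter_map, List.map_map]
  rfl

-- the if-add fold over distinct fresh keys is a filter
theorem pvFoldFilter (ks : List String) (P : String → Bool) (acc : PySem.Set String)
    (hnd : ks.Nodup) (hd : ∀ k ∈ ks, k ∉ acc) :
    ks.foldl (fun a k => if P k then PySem.Set.add a k else a) acc = acc ++ ks.filter P := by
  induction ks generalizing acc with
  | nil => simp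
  | cons k ks ih =>
    rw [List.foldl_cons]
    by_cases hP : P k
    · rw [if_pos hP, PySem.Set.add_of_not_mem (hd k (List.mem_cons_self))]
      have hacc : ∀ k' ∈ ks, k' ∉ acc ++ [k] := by
        intro k' hk' hk'acc
        rcases List.mem_append.1 hk'acc with h | h
        · exact hd k' (List.mem_cons_of_mem _ hk') h
        · rcases List.mem_singleton.1 h with rfl
          exact (List.nodup_cons.1 hnd).1 hk'
      rw [ih (acc ++ [k]) hnd.of_cons hacc]
      rw [List.filter_cons_of_pos hP, List.append_assoc]; rfl
    · rw [if_neg hP, List.filter_cons_of_neg hP]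
      exact ih acc hnd.of_cons (fun k' hk' => hd k' (List.mem_cons_of_mem _ hk'))

-- a nodup subset equals the whole set iff the lengths agree
theorem pvEqualIffLen {v all : List String} (hv : v.Nodup) (ha : all.Nodup) (hsub : v ⊆ all) :
    PySem.Set.equal v all = ((v.length : Int) == (all.length : Int)) := by
  rw [Bool.eq_iff_iff, PySem.Set.equal_iff, beq_iff_eq]
  constructor
  · intro h
    have hp : v.Perm all := (List.perm_ext_iff_of_nodup hv ha).2 h
    exact_mod_cast hp.length_eq
  · intro h
    have hlen : all.length ≤ v.length := by omega
    have hp : v.Perm all := (hv.subperm hsub).perm_of_length_le hlen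
    exact fun x => ⟨fun hx => hp.mem_iff.1 hx, fun hx => hp.mem_iff.2 hx⟩

-- ===== VERDICT (by name: the statement is the Claim_ definition above) =====
theorem get_intersection_texts_spec : Claim_equal_get_intersection_texts := by
  intro entries group_filter type_filter _dom _pre
  unfold Spec_get_intersection_texts get_intersection_texts get_intersection_texts_alt
  dsimp only
  rw [PySem.List.foldl_prod_mk
    (f := fun (d : PySem.Dict String (PySem.Set String)) (e : List (String × String)) =>
      d.modify (pvGet e "norm_text") PySem.Set.empty
        (fun v => PySem.Set.add v (pvGet e "speaker")))
    (g := fun (s : PySem.Set String) (e : List (String × String)) =>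
      PySem.Set.add s (pvGet e "speaker"))]
  rw [← List.foldl_filter
    (p := fun e => pvGet e "group" == group_filter && pvGet e "dtype" == type_filter)
    (f := fun (st : (PySem.Set (String × String) × PySem.Dict String Int) × PySem.Set String) e =>
      ((if st.1.1.contains (pvGet e "norm_text", pvGet e "speaker") then st.1
        else (PySem.Set.add st.1.1 (pvGet e "norm_text", pvGet e "speaker"),
              st.1.2.insert (pvGet e "norm_text") (st.1.2.getD (pvGet e "norm_text") 0 + 1))),
       PySem.Set.add st.2 (pvGet e "speaker")))]
  rw [PySem.List.foldl_prod_mk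
    (f := fun (sc : PySem.Set (String × String) × PySem.Dict String Int) (e : List (String × String)) =>
      if sc.1.contains (pvGet e "norm_text", pvGet e "speaker") then sc
      else (PySem.Set.add sc.1 (pvGet e "norm_text", pvGet e "speaker"),
            sc.2.insert (pvGet e "norm_text") (sc.2.getD (pvGet e "norm_text") 0 + 1)))
    (g := fun (s : PySem.Set String) (e : List (String × String)) =>
      PySem.Set.add s (pvGet e "speaker"))]
  rw [pvAll]
  obtain ⟨hB1, hB2, hB3⟩ := pvStateB
    (entries.filter (fun e => pvGet e "group" == group_filter && pvGet e "dtype" == type_filter))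
    (fun e => pvGet e "norm_text") (fun e => pvGet e "speaker")
  have hndA : (List.foldl (fun d e => d.modify (pvGet e "norm_text") PySem.Set.empty
      (fun v => PySem.Set.add v (pvGet e "speaker"))) PySem.Dict.empty
      (entries.filter (fun e => pvGet e "group" == group_filter && pvGet e "dtype" == type_filter))).keys.Nodup := by
    rw [pvKeysA]; exact PySem.Set.nodup_ofList _
  have hndB : (List.foldl (fun sc e => if sc.1.contains (pvGet e "norm_text", pvGet e "speaker") then sc
      else (PySem.Set.add sc.1 (pvGet e "norm_text", pvGet e "speaker"),
            sc.2.insert (pvGet e "norm_text") (sc.2.getD (pvGet e "norm_text") 0 + 1)))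
      ((PySem.Set.empty : PySem.Set (String × String)), (PySem.Dict.empty : PySem.Dict String Int))
      (entries.filter (fun e => pvGet e "group" == group_filter && pvGet e "dtype" == type_filter))).2.keys.Nodup := by
    rw [hB2]; exact PySem.Set.nodup_ofList _
  rw [PySem.Dict.items_eq_map_keys _ hndA PySem.Set.empty, List.foldl_map]
  rw [pvFoldFilter _ (fun k => PySem.Set.equal
      (PySem.Dict.getD (List.foldl (fun d e => d.modify (pvGet e "norm_text") PySem.Set.empty
        (fun v => PySem.Set.add v (pvGet e "speaker"))) PySem.Dict.empty
        (entries.filter (fun e => pvGet e "group" == group_filter && pvGet e "dtype" == type_filter)))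
        k PySem.Set.empty)
      (PySem.Set.ofList ((entries.filter (fun e => pvGet e "group" == group_filter &&
        pvGet e "dtype" == type_filter)).map (fun e => pvGet e "speaker"))))
    PySem.Set.empty hndA (by intro k _ hk; exact List.not_mem_nil hk)]
  rw [PySem.Dict.items_eq_map_keys _ hndB 0, List.filter_map, List.map_map]
  rw [show ((fun p : String × Int => p.1) ∘ fun k => (k, PySem.Dict.getD (List.foldl
      (fun sc e => if sc.1.contains (pvGet e "norm_text", pvGet e "speaker") then sc
        else (PySem.Set.add sc.1 (pvGet e "norm_text", pvGet e "speaker"),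
              sc.2.insert (pvGet e "norm_text") (sc.2.getD (pvGet e "norm_text") 0 + 1)))
      ((PySem.Set.empty : PySem.Set (String × String)), (PySem.Dict.empty : PySem.Dict String Int))
      (entries.filter (fun e => pvGet e "group" == group_filter && pvGet e "dtype" == type_filter))).2
      k 0)) = id from rfl, List.map_id]
  rw [hB2, pvKeysA]
  have hfilt : ∀ t, (fun k => PySem.Set.equal
      (PySem.Dict.getD (List.foldl (fun d e => d.modify (pvGet e "norm_text") PySem.Set.empty
        (fun v => PySem.Set.add v (pvGet e "speaker"))) PySem.Dict.empty
        (entries.filter (fun e => pvGet e "group" == group_filter && pvGet e "dtype" == type_filter)))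
        k PySem.Set.empty)
      (PySem.Set.ofList ((entries.filter (fun e => pvGet e "group" == group_filter &&
        pvGet e "dtype" == type_filter)).map (fun e => pvGet e "speaker")))) t
      = ((fun p : String × Int => p.2 == PySem.Set.len (PySem.Set.ofList
          ((entries.filter (fun e => pvGet e "group" == group_filter &&
            pvGet e "dtype" == type_filter)).map (fun e => pvGet e "speaker"))))
         ∘ fun k => (k, PySem.Dict.getD (List.foldl
          (fun sc e => if sc.1.contains (pvGet e "norm_text", pvGet e "speaker") then sc
            else (PySem.Set.add sc.1 (pvGet e "norm_text", pvGet e "speaker"),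
                  sc.2.insert (pvGet e "norm_text") (sc.2.getD (pvGet e "norm_text") 0 + 1)))
          ((PySem.Set.empty : PySem.Set (String × String)), (PySem.Dict.empty : PySem.Dict String Int))
          (entries.filter (fun e => pvGet e "group" == group_filter && pvGet e "dtype" == type_filter))).2
          k 0)) t := by
    intro t
    dsimp only [Function.comp]
    rw [pvDictA, hB3 t, pvPairs, pvPairsMap]
    have hvsub : (PySem.Set.ofList (((entries.filter (fun e => pvGet e "group" == group_filter &&
        pvGet e "dtype" == type_filter)).filter (fun e => pvGet e "norm_text" == t)).map
        (fun e => pvGet e "speaker")))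
        ⊆ PySem.Set.ofList ((entries.filter (fun e => pvGet e "group" == group_filter &&
            pvGet e "dtype" == type_filter)).map (fun e => pvGet e "speaker")) := by
      intro x hx
      rw [PySem.Set.mem_ofList, List.mem_map] at hx
      obtain ⟨e, he, hex⟩ := hx
      rw [PySem.Set.mem_ofList]
      exact List.mem_map.2 ⟨e, (List.mem_filter.1 he).1, hex⟩
    rw [pvEqualIffLen (PySem.Set.nodup_ofList _) (PySem.Set.nodup_ofList _) hvsub,
      List.length_map]
    simp [PySem.Set.len]
  rw [List.filter_congr (fun t _ => hfilt t)]
  rw [PySem.Set.ofList_eq_self_of_nodup _ ((PySem.Set.nodup_ofList _).filter _)]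
  rfl
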